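-- pv_equiv track=rewrite | github.com/leean260319-arch/yyy | v/script/oaispaper_cite_mapping.py | assign_group_codes
-- ===== SOURCE A (Python) =====
-- def assign_group_codes(papers: list[dict], group_by: str = 'keyword') -> list[dict]:
--     """논문에 그룹 코드 부여"""
--     # 간단한 그룹 분류 (키워드 기반)
--     group_counter = {}
--
--     for paper in papers:
--         group = 'Z'  # 기본
--
--         title_lower = paper['title'].lower()
--         if 'deep' in title_lower or 'neural' in title_lower or 'cnn' in title_lower:
--             group = 'A'  # 딥러닝
--         elif 'transformer' in title_lower or 'attention' in title_lower:
--             group = 'B'  # 트랜스포머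
--         elif 'crack' in title_lower or 'defect' in title_lower:
--             group = 'C'  # 결함 검출
--         elif 'segment' in title_lower or 'detection' in title_lower:
--             group = 'D'  # 세그멘테이션/검출
--         elif 'blur' in title_lower or 'deblur' in title_lower:
--             group = 'E'  # 블러/디블러
--
--         # 그룹 내 번호 부여
--         if group not in group_counter:
--             group_counter[group] = 0
--         group_counter[group] += 1
--
--         paper['group'] = group
--         paper['code'] = f"{group}{group_counter[group]:02d}"
--
--     return papers
-- ===== SOURCE B (Python) =====
-- # Staged re-implementation: pass 1 classifies every title by taking min() over the
-- # codes whose keywords match (codes 'A'..'E' are in priority order, 'Z' sorts last);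
-- # pass 2 numbers each paper by counting its group in the prefix of the groups list
-- # (no running counter dict). Return value and in-place mutation match A.
-- _TABLE = [
--     ('A', ('deep', 'neural', 'cnn')),
--     ('B', ('transformer', 'attention')),
--     ('C', ('crack', 'defect')),
--     ('D', ('segment', 'detection')),
--     ('E', ('blur', 'deblur')),
-- ]
--
-- def assign_group_codes(papers: list[dict], group_by: str = 'keyword') -> list[dict]:
--     groups = [min((c for c, kws in _TABLE
--                    if any(k in p['title'].lower() for k in kws)), default='Z')
--               for p in papers]
--     for i, (paper, g) in enumerate(zip(papers, groups)):
--         n = 1 + groups[:i].count(g)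
--         paper['group'] = g
--         paper['code'] = f"{g}{n:02d}"
--     return papers
-- ===== Notes on version B (the rewrite author's own statement) =====
-- stated objective: alternative
-- what changed: Replaces A's single pass with if/elif chain and running counter dict by two staged passes: a classification pass taking min() over the codes whose keywords match (codes A..E are in priority order, Z sorts after all), then a numbering pass computing each paper's number as 1 + the count of its group in the prefix groups[:i], eliminating the counter dict entirely.
import Mathlib
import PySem

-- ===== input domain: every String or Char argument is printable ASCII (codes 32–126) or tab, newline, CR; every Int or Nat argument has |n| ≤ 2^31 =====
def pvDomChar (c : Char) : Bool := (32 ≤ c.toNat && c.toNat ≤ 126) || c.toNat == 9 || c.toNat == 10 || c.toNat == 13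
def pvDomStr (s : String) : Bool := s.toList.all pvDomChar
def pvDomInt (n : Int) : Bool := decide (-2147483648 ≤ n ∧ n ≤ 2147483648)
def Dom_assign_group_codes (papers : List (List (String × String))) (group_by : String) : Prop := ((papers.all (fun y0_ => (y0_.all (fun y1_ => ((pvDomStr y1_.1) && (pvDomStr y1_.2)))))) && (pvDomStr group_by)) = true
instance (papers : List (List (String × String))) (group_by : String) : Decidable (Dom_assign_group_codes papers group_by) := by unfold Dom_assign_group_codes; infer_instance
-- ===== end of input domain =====

-- ===== PORT A =====
-- B replaces A's single pass (if/elif keyword chain + running counter dict) by two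
-- staged passes: a min-over-matching-codes classification pass, then a numbering
-- pass counting each group in the prefix of the groups list. The claim is about
-- the RETURN value (both Pythons also mutate the paper dicts in place, with
-- identical final state).

-- shared f-string helper: f"{group}{n:02d}" (both Pythons use the same format string)
def agcFmt (group : String) (n : Int) : String :=
  let ds := PySem.Int.toChars n
  String.ofList (group.toList ++ (if ds.length < 2 then '0' :: ds else ds))

-- A's loop body (the body of 'for paper in papers'), state = (group_counter, output rows)
def agcStepA (st : PySem.Dict String Int × List (List (String × String)))
    (paper : List (String × String)) :
    PySem.Dict String Int × List (List (String × String)) :=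
  let d := PySem.Dict.ofList paper
  let t := PySem.Str.lower (d.getD "title" "")
  let group :=
    if PySem.Str.isIn "deep" t || PySem.Str.isIn "neural" t || PySem.Str.isIn "cnn" t then "A"
    else if PySem.Str.isIn "transformer" t || PySem.Str.isIn "attention" t then "B"
    else if PySem.Str.isIn "crack" t || PySem.Str.isIn "defect" t then "C"
    else if PySem.Str.isIn "segment" t || PySem.Str.isIn "detection" t then "D"
    else if PySem.Str.isIn "blur" t || PySem.Str.isIn "deblur" t then "E"
    else "Z"
  let c1 := if st.1.contains group then st.1 else st.1.insert group 0
  let c2 := c1.modify group 0 (· + 1)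
  let d2 := (d.insert "group" group).insert "code" (agcFmt group (c2.getD group 0))
  (c2, st.2 ++ [d2.items])

def assign_group_codes (papers : List (List (String × String))) (group_by : String) : List (List (String × String)) :=
  (papers.foldl agcStepA (PySem.Dict.empty, [])).2

-- ===== PORT B =====
def agcTable : List (String × List String) :=
  [("A", ["deep", "neural", "cnn"]),
   ("B", ["transformer", "attention"]),
   ("C", ["crack", "defect"]),
   ("D", ["segment", "detection"]),
   ("E", ["blur", "deblur"])]

-- min((c for c, kws in _TABLE if any(k in t for k in kws)), default='Z')
def agcClassify (t : String) : String :=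
  PySem.List.minD
    ((agcTable.filter (fun e => e.2.any (fun k => PySem.Str.isIn k t))).map (·.1))
    (fun c => c) "Z"

def assign_group_codes_alt (papers : List (List (String × String))) (group_by : String) : List (List (String × String)) :=
  let groups := papers.map (fun p =>
    agcClassify (PySem.Str.lower ((PySem.Dict.ofList p).getD "title" "")))
  (PySem.List.enumerate (papers.zip groups)).map (fun x =>
    let g := x.2.2
    let n : Int := 1 + (PySem.List.count (PySem.List.slice groups none (some x.1)) g : Int)
    ((((PySem.Dict.ofList x.2.1).insert "group" g).insert "code" (agcFmt g n)).items))

-- ===== PRECONDITION & SPEC =====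
-- Pre_ excludes papers without a 'title' key, on which A raises KeyError (B raises too).
def Pre_assign_group_codes (papers : List (List (String × String))) (group_by : String) : Prop :=
  ∀ paper ∈ papers, (PySem.Dict.ofList paper).contains "title" = true
instance (papers : List (List (String × String))) (group_by : String) : Decidable (Pre_assign_group_codes papers group_by) := by unfold Pre_assign_group_codes; infer_instance

def pvWitness_assign_group_codes : (List (List (String × String))) × String :=
  ([[("title", "Deep crack detection")], [("title", "a survey"), ("year", "2021")]], "keyword")

def Spec_assign_group_codes (papers : List (List (String × String))) (group_by : String) (out : List (List (String × String))) : Prop := out = assign_group_codes_alt papers group_by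
instance (papers : List (List (String × String))) (group_by : String) (out : List (List (String × String))) : Decidable (Spec_assign_group_codes papers group_by out) := by unfold Spec_assign_group_codes; infer_instance

-- ===== CLAIM (what is proved, stated in full; the proofs are below) =====
def Claim_equal_assign_group_codes : Prop := ∀ (papers : List (List (String × String))) (group_by : String), Dom_assign_group_codes papers group_by → Pre_assign_group_codes papers group_by → Spec_assign_group_codes papers group_by (assign_group_codes papers group_by)

-- ===== LEMMAS AND PROOFS =====

-- group of one paper (B's classification), and the dict row both programs emit
def agcG (paper : List (String × String)) : String :=
  agcClassify (PySem.Str.lower ((PySem.Dict.ofList paper).getD "title" ""))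

def agcRow (paper : List (String × String)) (g : String) (n : Int) : List (String × String) :=
  (((PySem.Dict.ofList paper).insert "group" g).insert "code" (agcFmt g n)).items

-- common specification: recursion carrying the list of groups already emitted
def agcSpec (seen : List String) (rest : List (List (String × String))) : List (List (String × String)) :=
  match rest with
  | [] => []
  | paper :: rs =>
      let g := agcG paper
      agcRow paper g (1 + (seen.count g : Int)) :: agcSpec (seen ++ [g]) rs

-- B's min-over-matching-codes equals A's if/elif chain (codes are in sorted order).
lemma agc_classify_eq (t : String) :
    agcClassify t =
    (if PySem.Str.isIn "deep" t || PySem.Str.isIn "neural" t || PySem.Str.isIn "cnn" t then "A"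
     else if PySem.Str.isIn "transformer" t || PySem.Str.isIn "attention" t then "B"
     else if PySem.Str.isIn "crack" t || PySem.Str.isIn "defect" t then "C"
     else if PySem.Str.isIn "segment" t || PySem.Str.isIn "detection" t then "D"
     else if PySem.Str.isIn "blur" t || PySem.Str.isIn "deblur" t then "E"
     else "Z") := by
  unfold agcClassify agcTable
  simp only [List.filter_cons, List.filter_nil, List.any_cons, List.any_nil, Bool.or_false]
  cases h1 : (PySem.Str.isIn "deep" t || (PySem.Str.isIn "neural" t || PySem.Str.isIn "cnn" t)) <;>
  cases h2 : (PySem.Str.isIn "transformer" t || PySem.Str.isIn "attention" t) <;>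
  cases h3 : (PySem.Str.isIn "crack" t || PySem.Str.isIn "defect" t) <;>
  cases h4 : (PySem.Str.isIn "segment" t || PySem.Str.isIn "detection" t) <;>
  cases h5 : (PySem.Str.isIn "blur" t || PySem.Str.isIn "deblur" t) <;>
  simp only [Bool.or_assoc, h1, h2, h3, h4, h5] <;>
  simp [PySem.List.minD, PySem.List.min?] <;> decide

-- A's setdefault-style update followed by += 1 is a single insert.
lemma agc_counter_eq (c : PySem.Dict String Int) (g : String) :
    (if c.contains g then c else c.insert g 0).modify g 0 (· + 1) =
    c.insert g (c.getD g 0 + 1) := by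
  by_cases h : c.contains g = true
  · simp [h, PySem.Dict.modify]
  · have h' : c.contains g = false := by simpa using h
    simp [h', PySem.Dict.modify, PySem.Dict.insert_insert_self,
      PySem.Dict.getD_of_not_contains c 0 h']

-- one iteration of A's loop, in closed form
lemma agc_stepA_eq (c : PySem.Dict String Int) (acc : List (List (String × String)))
    (paper : List (String × String)) :
    agcStepA (c, acc) paper =
    (c.insert (agcG paper) (c.getD (agcG paper) 0 + 1),
     acc ++ [agcRow paper (agcG paper) (c.getD (agcG paper) 0 + 1)]) := by
  unfold agcStepA agcRow
  dsimp only
  rw [← agc_classify_eq]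
  rw [agc_counter_eq]
  rw [PySem.Dict.getD_insert_self]
  rfl

-- A's fold, started from a counter agreeing with the groups already seen, yields agcSpec.
lemma agc_fold_spec (rest : List (List (String × String)))
    (c : PySem.Dict String Int) (acc : List (List (String × String))) (seen : List String)
    (hc : ∀ g, c.getD g 0 = (seen.count g : Int)) :
    (rest.foldl agcStepA (c, acc)).2 = acc ++ agcSpec seen rest := by
  induction rest generalizing c acc seen with
  | nil => simp [agcSpec]
  | cons paper rs ih =>
      rw [List.foldl_cons, agc_stepA_eq, agcSpec]
      rw [ih _ _ (seen ++ [agcG paper])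
        (fun g' => by
          rw [PySem.Dict.getD_insert, hc g']
          by_cases hgg : g' = agcG paper
          · subst hgg; simp [List.count_append, hc]
          · simp [hgg, List.count_append, Ne.symm hgg])]
      rw [hc (agcG paper)]
      have hn : (seen.count (agcG paper) : Int) + 1 = 1 + (seen.count (agcG paper) : Int) := by ring
      rw [hn, List.append_assoc, List.singleton_append]

-- B's enumerate/prefix-count map yields agcSpec.
lemma agc_alt_spec (rest : List (List (String × String))) (groups : List String) (s : Nat)
    (hg : groups.drop s = rest.map agcG) :
    (PySem.List.enumerate (rest.zip (rest.map agcG)) (s : Int)).map (fun x =>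
      agcRow x.2.1 x.2.2 (1 + (PySem.List.count (PySem.List.slice groups none (some x.1)) x.2.2 : Int)))
    = agcSpec (groups.take s) rest := by
  induction rest generalizing s with
  | nil => simp [agcSpec]
  | cons paper rs ih =>
      have hhead : groups[s]? = some (agcG paper) := by
        rw [← List.head?_drop, hg]; rfl
      have htake : groups.take (s + 1) = groups.take s ++ [agcG paper] := by
        rw [List.take_add_one, hhead]; rfl
      have hdrop : groups.drop (s + 1) = rs.map agcG := by
        rw [← List.tail_drop, hg]; rfl
      rw [List.map_cons, List.zip_cons_cons, PySem.List.enumerate_cons, List.map_cons, agcSpec]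
      have hs1 : (s : Int) + 1 = ((s + 1 : Nat) : Int) := by push_cast; ring
      rw [hs1, ih (s + 1) hdrop, htake]
      rw [PySem.List.slice_to_natCast, PySem.List.count_eq]

-- ===== VERDICT (by name: the statement is the Claim_ definition above) =====
theorem assign_group_codes_spec : Claim_equal_assign_group_codes := by
  intro papers group_by _ _
  unfold Spec_assign_group_codes assign_group_codes assign_group_codes_alt
  have hA : (papers.foldl agcStepA (PySem.Dict.empty, [])).2 = agcSpec [] papers :=
    agc_fold_spec papers PySem.Dict.empty [] [] (fun g => by simp [PySem.Dict.getD_empty])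
  have hmap : papers.map (fun p =>
      agcClassify (PySem.Str.lower ((PySem.Dict.ofList p).getD "title" ""))) = papers.map agcG := rfl
  have hB := agc_alt_spec papers (papers.map agcG) 0 (by simp)
  rw [hA]
  dsimp only
  rw [hmap]
  rw [Nat.cast_zero] at hB
  simp only [List.take_zero] at hB
  rw [← hB]
  rfl
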